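-- pv_equiv track=rewrite | github.com/arkalia-luna-system/ia-pipeline | archive/archivage_20250720_151643/integration_finale_phase4.py | select_main_functions
-- ===== SOURCE A (Python) =====
-- from typing import List, Dict, Any
--
-- def select_main_functions(functions: List[str], module_name: str) -> List[str]:
--     """Sélectionner les fonctions principales d'un module"""
--     main_functions = []
--
--     # Priorité aux fonctions avec le nom du module
--     for func in functions:
--         if func.lower().replace('_', '') == module_name.lower().replace('_', ''):
--             main_functions.append(func)
--
--     # Priorité aux fonctions avec des mots-clés spécifiques
--     priority_keywords = ['main', 'run', 'execute', 'start', 'analyze', 'generate', 'create', 'init', 'validate', 'edit']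
--     for keyword in priority_keywords:
--         for func in functions:
--             if keyword in func.lower() and func not in main_functions:
--                 main_functions.append(func)
--
--     # Si aucune fonction prioritaire, prendre les 3 premières
--     if not main_functions and functions:
--         main_functions = functions[:3]
--
--     return main_functions
-- ===== SOURCE B (Python) =====
-- from typing import List
--
-- def select_main_functions(functions: List[str], module_name: str) -> List[str]:
--     """Select a module's priority functions: one pass bucketing by first matching keyword."""
--     keywords = ['main', 'run', 'execute', 'start', 'analyze', 'generate', 'create', 'init', 'validate', 'edit']
--     target = module_name.lower().replace('_', '')
--     module_part = [f for f in functions if f.lower().replace('_', '') == target]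
--     seen = set(module_part)
--     buckets = [[] for _ in keywords]
--     for f in functions:
--         if f in seen:
--             continue
--         fl = f.lower()
--         for i, kw in enumerate(keywords):
--             if kw in fl:
--                 buckets[i].append(f)
--                 seen.add(f)
--                 break
--     result = module_part + [f for b in buckets for f in b]
--     if not result and functions:
--         result = functions[:3]
--     return result
-- ===== Notes on version B (the rewrite author's own statement) =====
-- stated objective: faster
-- what changed: A rescans `functions` once per priority keyword and deduplicates with a linear `not in` scan of the growing result list; B makes a single pass over `functions`, bucketing each function under its first matching keyword with an O(1) `seen` set, then concatenates the module-name matches and the buckets.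
import Mathlib
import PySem

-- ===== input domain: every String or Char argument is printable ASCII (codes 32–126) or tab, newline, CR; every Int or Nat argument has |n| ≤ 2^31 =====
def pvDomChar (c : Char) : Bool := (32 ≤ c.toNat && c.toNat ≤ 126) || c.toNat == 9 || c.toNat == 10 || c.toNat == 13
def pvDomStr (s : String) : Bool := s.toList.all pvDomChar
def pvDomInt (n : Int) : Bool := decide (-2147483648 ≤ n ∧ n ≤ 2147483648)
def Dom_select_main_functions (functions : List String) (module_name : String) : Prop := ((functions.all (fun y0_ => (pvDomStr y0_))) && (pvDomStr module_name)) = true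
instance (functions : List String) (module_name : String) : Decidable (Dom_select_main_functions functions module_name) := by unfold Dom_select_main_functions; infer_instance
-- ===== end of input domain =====

-- B replaces A's ten rescans of `functions` (one per priority keyword, with a linear `not in`
-- scan of the result) by a single pass bucketing each function under its first matching keyword
-- with a `seen` set (objective: faster; measured faster in a timing run).

-- shared helpers: both Pythons compute func.lower().replace('_','') and use the same keyword list
def pvNorm (s : String) : String := PySem.Str.replace (PySem.Str.lower s) "_" ""

def pvKeywords : List String :=
  ["main", "run", "execute", "start", "analyze", "generate", "create", "init", "validate", "edit"]

-- ===== PORT A =====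
def select_main_functions (functions : List String) (module_name : String) : List String :=
  -- for func in functions: if func.lower().replace('_','') == module_name.lower().replace('_',''): append
  let main0 := functions.foldl
    (fun acc func => if pvNorm func == pvNorm module_name then acc ++ [func] else acc) []
  -- for keyword in priority_keywords: for func in functions:
  --   if keyword in func.lower() and func not in main_functions: append
  let main1 := pvKeywords.foldl
    (fun acc kw => functions.foldl
      (fun acc func =>
        if PySem.Str.isIn kw (PySem.Str.lower func) = true ∧ func ∉ acc then acc ++ [func] else acc)
      acc)
    main0
  -- if not main_functions and functions: main_functions = functions[:3]
  if main1 = [] ∧ functions ≠ [] then functions.take 3 else main1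

-- ===== PORT B =====
-- index of the first keyword contained in fl (Python B's enumerate/break loop), none if no match
def pvFindKw (ks : List String) (n : Nat) (fl : String) : Option Nat :=
  match ks with
  | [] => none
  | kw :: rest => if PySem.Str.isIn kw fl then some n else pvFindKw rest (n + 1) fl

def pvFk (f : String) : Option Nat := pvFindKw pvKeywords 0 (PySem.Str.lower f)

-- B's single pass over `functions`: state = (buckets, seen)
def pvBLoop : List String → List (List String) × PySem.Set String → List (List String) × PySem.Set String
  | [], st => st
  | f :: rest, st =>
    if PySem.Set.contains st.2 f then pvBLoop rest st
    else
      match pvFk f with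
      | some i => pvBLoop rest (st.1.set i ((st.1.getD i []) ++ [f]), PySem.Set.add st.2 f)
      | none => pvBLoop rest st

def select_main_functions_alt (functions : List String) (module_name : String) : List String :=
  let target := pvNorm module_name
  let module_part := functions.filter (fun f => pvNorm f == target)
  let seen := PySem.Set.ofList module_part
  let st := pvBLoop functions (List.replicate 10 [], seen)
  let result := module_part ++ st.1.flatten
  if result = [] ∧ functions ≠ [] then functions.take 3 else result

-- ===== PRECONDITION & SPEC =====
def Spec_select_main_functions (functions : List String) (module_name : String) (out : List String) : Prop := out = select_main_functions_alt functions module_name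
instance (functions : List String) (module_name : String) (out : List String) : Decidable (Spec_select_main_functions functions module_name out) := by unfold Spec_select_main_functions; infer_instance

-- ===== CLAIM (what is proved, stated in full; the proofs are below) =====
def Claim_equal_select_main_functions : Prop := ∀ (functions : List String) (module_name : String), Dom_select_main_functions functions module_name → Spec_select_main_functions functions module_name (select_main_functions functions module_name)

-- ===== LEMMAS AND PROOFS =====

-- value-level predicates and the canonical form both ports are reduced to
def pvMod (mn f : String) : Bool := pvNorm f == pvNorm mn
abbrev pvQb (mn : String) (j : Nat) (f : String) : Prop := pvMod mn f = false ∧ pvFk f = some j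
def pvGrow (q : String → Prop) [DecidablePred q] : List String → List String → List String
  | [], E => E
  | f :: L, E => if q f ∧ f ∉ E then pvGrow q L (E ++ [f]) else pvGrow q L E

def growQ (mn : String) (j : Nat) : List String → List String → List String :=
  pvGrow (pvQb mn j)

def catF (mn : String) (F : List String) (j : Nat) : List String :=
  F.filter (fun f => pvMod mn f) ++ (List.range j).flatMap (fun i => growQ mn i F [])

lemma pvGrow_mem (q : String → Prop) [DecidablePred q] :
    ∀ (L E : List String) (x : String),
      x ∈ pvGrow q L E ↔ x ∈ E ∨ (q x ∧ x ∈ L) := by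
  intro L
  induction L with
  | nil => intro E x; simp [pvGrow]
  | cons f L ih =>
    intro E x
    simp only [pvGrow]
    split_ifs with h <;>
      · rw [ih]
        simp only [List.mem_append, List.mem_singleton, List.mem_cons]
        by_cases hx : x = f
        · subst hx; tauto
        · tauto

lemma growQ_mem (mn : String) (j : Nat) (L E : List String) (x : String) :
    x ∈ growQ mn j L E ↔ x ∈ E ∨ (pvQb mn j x ∧ x ∈ L) :=
  pvGrow_mem _ L E x

lemma pvGrow_snoc (q : String → Prop) [DecidablePred q] :
    ∀ (L E : List String) (f : String),
      pvGrow q (L ++ [f]) E =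
        if q f ∧ f ∉ pvGrow q L E then pvGrow q L E ++ [f] else pvGrow q L E := by
  intro L
  induction L with
  | nil => intro E f; simp [pvGrow]
  | cons g L ih =>
    intro E f
    simp only [List.cons_append, pvGrow]
    split_ifs <;> rw [ih] <;> simp_all

lemma growQ_snoc (mn : String) (j : Nat) (L E : List String) (f : String) :
    growQ mn j (L ++ [f]) E =
      if pvQb mn j f ∧ f ∉ growQ mn j L E then growQ mn j L E ++ [f] else growQ mn j L E :=
  pvGrow_snoc _ L E f

lemma catF_succ (mn : String) (F : List String) (j : Nat) :
    catF mn F (j + 1) = catF mn F j ++ growQ mn j F [] := by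
  simp [catF, List.range_succ, List.flatMap_append]

lemma catF_mem (mn : String) (F : List String) (j : Nat) (x : String) :
    x ∈ catF mn F j ↔
      (pvMod mn x = true ∧ x ∈ F) ∨ (pvMod mn x = false ∧ ∃ i, i < j ∧ pvFk x = some i ∧ x ∈ F) := by
  simp only [catF, List.mem_append, List.mem_filter, List.mem_flatMap, List.mem_range, growQ_mem,
    List.not_mem_nil, false_or, pvQb]
  constructor
  · rintro (⟨hF, hmd⟩ | ⟨i, hij, ⟨hmd, hfk⟩, hiF⟩)
    · exact Or.inl ⟨hmd, hF⟩
    · exact Or.inr ⟨hmd, i, hij, hfk, hiF⟩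
  · rintro (⟨hmd, hF⟩ | ⟨hmd, i, hij, hfk, hiF⟩)
    · exact Or.inl ⟨hF, hmd⟩
    · exact Or.inr ⟨i, hij, ⟨hmd, hfk⟩, hiF⟩

lemma pvFindKw_none_iff (fl : String) :
    ∀ (ks : List String) (n : Nat),
      pvFindKw ks n fl = none ↔ ∀ d (hd : d < ks.length), PySem.Str.isIn ks[d] fl = false := by
  intro ks
  induction ks with
  | nil => intro n; simp [pvFindKw]
  | cons kw rest ih =>
    intro n
    simp only [pvFindKw]
    split_ifs with h
    · simp only [false_iff]
      intro hall
      have := hall 0 (by simp)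
      simp only [List.getElem_cons_zero] at this
      rw [this] at h
      exact Bool.false_ne_true h
    · rw [ih (n+1)]
      constructor
      · intro hall d hd
        cases d with
        | zero => simpa using Bool.eq_false_iff.mpr h
        | succ d => simpa using hall d (by simpa using hd)
      · intro hall d hd
        simpa using hall (d+1) (by simpa using hd)

lemma pvFindKw_some_iff (fl : String) :
    ∀ (ks : List String) (n m : Nat),
      pvFindKw ks n fl = some m ↔
        ∃ d, ∃ hd : d < ks.length, m = n + d ∧ PySem.Str.isIn ks[d] fl = true ∧
          ∀ e (he : e < d), PySem.Str.isIn (ks[e]'(he.trans hd)) fl = false := by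
  intro ks
  induction ks with
  | nil => intro n m; simp [pvFindKw]
  | cons kw rest ih =>
    intro n m
    simp only [pvFindKw]
    split_ifs with h
    · constructor
      · intro hm
        refine ⟨0, by simp, by simpa using (Option.some_inj.mp hm).symm, by simpa using h, by omega⟩
      · rintro ⟨d, hd, hm, hk, hmin⟩
        cases d with
        | zero => simp [hm]
        | succ d =>
          have := hmin 0 (by omega)
          simp at h this
          rw [this] at h
          exact absurd h (by simp)
    · rw [ih (n+1) m]
      constructor
      · rintro ⟨d, hd, hm, hk, hmin⟩
        refine ⟨d+1, by simpa using hd, by omega, by simpa using hk, ?_⟩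
        intro e he
        cases e with
        | zero => simpa using Bool.eq_false_iff.mpr h
        | succ e => simpa using hmin e (by omega)
      · rintro ⟨d, hd, hm, hk, hmin⟩
        cases d with
        | zero => simp at h hk; simp [hk] at h
        | succ d =>
          refine ⟨d, by simpa using hd, by omega, by simpa using hk, ?_⟩
          intro e he
          simpa using hmin (e+1) (by omega)

lemma pvFk_lt10 {x : String} {m : Nat} (h : pvFk x = some m) : m < 10 := by
  rw [pvFk, pvFindKw_some_iff] at h
  obtain ⟨d, hd, hm, _⟩ := h
  simp [pvKeywords] at hd
  omega

lemma pvFk_isIn {x : String} {m : Nat} (h : pvFk x = some m) (hm : m < 10) :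
    PySem.Str.isIn (pvKeywords[m]'(by simpa [pvKeywords] using hm)) (PySem.Str.lower x) = true := by
  rw [pvFk, pvFindKw_some_iff] at h
  obtain ⟨d, hd, hmd, hk, _⟩ := h
  have : m = d := by omega
  subst this
  exact hk

lemma pvFk_min {x : String} {m : Nat} (h : pvFk x = some m) :
    ∀ e (he : e < m), PySem.Str.isIn (pvKeywords[e]'(by have := pvFk_lt10 h; simp [pvKeywords]; omega)) (PySem.Str.lower x) = false := by
  intro e he
  rw [pvFk, pvFindKw_some_iff] at h
  obtain ⟨d, hd, hmd, hk, hmin⟩ := h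
  exact hmin e (by omega)

lemma pvFk_none {x : String} (h : pvFk x = none) :
    ∀ d (hd : d < 10), PySem.Str.isIn (pvKeywords[d]'(by simpa [pvKeywords] using hd)) (PySem.Str.lower x) = false := by
  intro d hd
  rw [pvFk, pvFindKw_none_iff] at h
  exact h d (by simpa [pvKeywords] using hd)

lemma hS_j (mn : String) (F : List String) (j : Nat) (hj : j < 10) :
    ∀ x ∈ F,
      ((PySem.Str.isIn (pvKeywords[j]'(by simpa [pvKeywords] using hj)) (PySem.Str.lower x) = true ∧
        x ∉ catF mn F j) ↔ pvQb mn j x) := by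
  intro x hx
  constructor
  · rintro ⟨hc, hnot⟩
    rw [catF_mem] at hnot
    push_neg at hnot
    obtain ⟨hnA, hnB⟩ := hnot
    have hmd : pvMod mn x = false := by
      cases hmk : pvMod mn x
      · rfl
      · exact absurd hx (hnA hmk)
    have hno : ∀ i, i < j → pvFk x ≠ some i := by
      intro i hij hfk
      exact hnB hmd i hij hfk hx
    refine ⟨hmd, ?_⟩
    cases hfk : pvFk x with
    | none => exact absurd hc (by simpa using pvFk_none hfk j hj)
    | some m =>
      have hm10 := pvFk_lt10 hfk
      rcases lt_trichotomy m j with hlt | heq | hgt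
      · exact absurd hfk (hno m hlt)
      · rw [heq]
      · have := pvFk_min hfk j hgt
        rw [this] at hc
        exact absurd hc (by simp)
  · rintro ⟨hmd, hfk⟩
    refine ⟨pvFk_isIn hfk hj, ?_⟩
    rw [catF_mem]
    rintro (⟨hmd', _⟩ | ⟨_, i, hij, hfk', _⟩)
    · rw [hmd] at hmd'; exact absurd hmd' (by simp)
    · rw [hfk] at hfk'
      have : j = i := by exact Option.some_inj.mp hfk'
      omega

lemma innerA (c : String → Bool) (mn : String) (j : Nat) (S : List String) :
    ∀ (L E : List String),
      (∀ x ∈ L, (c x = true ∧ x ∉ S) ↔ pvQb mn j x) →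
      L.foldl (fun acc func => if c func = true ∧ func ∉ acc then acc ++ [func] else acc) (S ++ E)
        = S ++ growQ mn j L E := by
  intro L
  induction L with
  | nil => intro E h; simp [growQ, pvGrow]
  | cons f L ih =>
    intro E hL
    have hf := hL f (by simp)
    have hcond : (c f = true ∧ f ∉ S ++ E) ↔ (pvQb mn j f ∧ f ∉ E) := by
      simp only [List.mem_append]
      constructor
      · rintro ⟨hc, hmem⟩
        exact ⟨hf.mp ⟨hc, fun h => hmem (Or.inl h)⟩, fun h => hmem (Or.inr h)⟩
      · rintro ⟨hq, hE⟩
        obtain ⟨hc, hS⟩ := hf.mpr hq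
        exact ⟨hc, by tauto⟩
    simp only [List.foldl_cons, growQ, pvGrow]
    by_cases h : pvQb mn j f ∧ f ∉ E
    · rw [if_pos (hcond.mpr h), if_pos h, List.append_assoc]
      exact ih (E ++ [f]) (fun x hx => hL x (by simp [hx]))
    · rw [if_neg (fun hc' => h (hcond.mp hc')), if_neg h]
      exact ih E (fun x hx => hL x (by simp [hx]))

lemma Astep (mn : String) (F : List String) (j : Nat) (hj : j < 10) (kw : String)
    (hkw : pvKeywords[j]'(by simpa [pvKeywords] using hj) = kw) :
    F.foldl (fun acc func =>
        if PySem.Str.isIn kw (PySem.Str.lower func) = true ∧ func ∉ acc then acc ++ [func] else acc)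
      (catF mn F j) = catF mn F (j + 1) := by
  have h := innerA (fun x => PySem.Str.isIn kw (PySem.Str.lower x)) mn j (catF mn F j) F []
    (by intro x hx; rw [← hkw]; exact hS_j mn F j hj x hx)
  rw [catF_succ]
  simpa using h


lemma B_loop_inv (mn : String) (F : List String) :
    ∀ (L pre : List String) (bk : List (List String)) (seen : PySem.Set String),
      (∀ x ∈ L, x ∈ F) →
      bk.length = 10 →
      (∀ i, i < 10 → bk.getD i [] = growQ mn i pre []) →
      (∀ x, (PySem.Set.contains seen x = true ↔
        (pvMod mn x = true ∧ x ∈ F) ∨ (pvMod mn x = false ∧ (pvFk x).isSome ∧ x ∈ pre))) →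
      (pvBLoop L (bk, seen)).1.length = 10 ∧
        ∀ i, i < 10 → ((pvBLoop L (bk, seen)).1).getD i [] = growQ mn i (pre ++ L) [] := by
  intro L
  induction L with
  | nil =>
    intro pre bk seen _ hlen hbk _
    simpa [pvBLoop] using ⟨hlen, hbk⟩
  | cons f L ih =>
    intro pre bk seen hL hlen hbk hseen
    have hfF : f ∈ F := hL f (by simp)
    simp only [pvBLoop]
    by_cases hc : PySem.Set.contains seen f = true
    · rw [if_pos hc]
      have step : ∀ i, i < 10 → growQ mn i (pre ++ [f]) [] = growQ mn i pre [] := by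
        intro i hi
        rw [growQ_snoc, if_neg]
        rintro ⟨⟨hmd, hfk⟩, hnot⟩
        rcases (hseen f).mp hc with ⟨hmd', _⟩ | ⟨_, _, hpre⟩
        · rw [hmd] at hmd'; exact absurd hmd' (by simp)
        · exact hnot ((growQ_mem mn i pre [] f).mpr (Or.inr ⟨⟨hmd, hfk⟩, hpre⟩))
      have hres := ih (pre ++ [f]) bk seen (fun x hx => hL x (by simp [hx])) hlen
        (fun i hi => by rw [hbk i hi, step i hi])
        (fun x => by
          rw [hseen x]
          by_cases hxf : x = f
          · subst hxf
            constructor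
            · rintro (h1 | ⟨a, b, c⟩)
              · exact Or.inl h1
              · exact Or.inr ⟨a, b, by simp [c]⟩
            · intro _; exact (hseen x).mp hc
          · simp only [List.mem_append, List.mem_singleton, hxf, or_false])
      simpa [List.append_assoc] using hres
    · rw [if_neg hc]
      cases hfk : pvFk f with
      | none =>
        have step : ∀ i, i < 10 → growQ mn i (pre ++ [f]) [] = growQ mn i pre [] := by
          intro i hi
          rw [growQ_snoc, if_neg]
          rintro ⟨⟨hmd, hfk'⟩, _⟩
          rw [hfk] at hfk'
          simp at hfk'
        have hres := ih (pre ++ [f]) bk seen (fun x hx => hL x (by simp [hx])) hlen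
          (fun i hi => by rw [hbk i hi, step i hi])
          (fun x => by
            rw [hseen x]
            by_cases hxf : x = f
            · subst hxf
              constructor
              · rintro (h1 | ⟨_, b, _⟩)
                · exact Or.inl h1
                · rw [hfk] at b; exact absurd b (by simp)
              · rintro (h1 | ⟨_, b, _⟩)
                · exact Or.inl h1
                · rw [hfk] at b; exact absurd b (by simp)
            · simp only [List.mem_append, List.mem_singleton, hxf, or_false])
        simpa [List.append_assoc] using hres
      | some i0 =>
        have hi0 : i0 < 10 := pvFk_lt10 hfk
        have hmdf : pvMod mn f = false := by
          cases hmk : pvMod mn f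
          · rfl
          · exact absurd ((hseen f).mpr (Or.inl ⟨hmk, hfF⟩)) hc
        have hfpre : f ∉ pre := fun hp =>
          hc ((hseen f).mpr (Or.inr ⟨hmdf, by simp [hfk], hp⟩))
        have hfgrow : f ∉ growQ mn i0 pre [] := by
          rw [growQ_mem]
          rintro (h1 | ⟨_, hp⟩)
          · exact absurd h1 (by simp)
          · exact hfpre hp
        have hres := ih (pre ++ [f]) (bk.set i0 ((bk.getD i0 []) ++ [f])) (PySem.Set.add seen f)
          (fun x hx => hL x (by simp [hx]))
          (by simpa using hlen)
          (fun i hi => by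
            rw [List.getD_eq_getElem _ [] (by simp [hlen]; omega),
              List.getElem_set, growQ_snoc]
            by_cases hii : i0 = i
            · subst hii
              rw [if_pos rfl, if_pos ⟨⟨hmdf, hfk⟩, hfgrow⟩, hbk i0 hi]
            · rw [if_neg hii, if_neg (by rintro ⟨⟨_, hfk'⟩, _⟩; rw [hfk] at hfk'; exact hii (Option.some_inj.mp hfk'))]
              rw [← List.getD_eq_getElem _ [] (show i < bk.length by omega), hbk i hi]
          )
          (fun x => by
            rw [PySem.Set.contains_iff, PySem.Set.mem_add, ← PySem.Set.contains_iff, hseen x]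
            by_cases hxf : x = f
            · subst hxf
              simp only [or_true, true_iff]
              exact Or.inr ⟨hmdf, by simp [hfk], by simp⟩
            · simp only [hxf, or_false, List.mem_append, List.mem_singleton])
        simpa [List.append_assoc] using hres

set_option maxHeartbeats 1000000 in
lemma Aside (mn : String) (F : List String) :
    select_main_functions F mn =
      (if catF mn F 10 = [] ∧ F ≠ [] then F.take 3 else catF mn F 10) := by
  simp only [select_main_functions]
  rw [PySem.List.foldl_append_if_eq_filter]
  rw [show ([] : List String) ++ F.filter (fun func => pvNorm func == pvNorm mn) = catF mn F 0 from
    by simp [catF, pvMod]]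
  simp only [pvKeywords, List.foldl_cons, List.foldl_nil]
  rw [Astep mn F 0 (by omega) "main" rfl, Astep mn F 1 (by omega) "run" rfl,
    Astep mn F 2 (by omega) "execute" rfl, Astep mn F 3 (by omega) "start" rfl,
    Astep mn F 4 (by omega) "analyze" rfl, Astep mn F 5 (by omega) "generate" rfl,
    Astep mn F 6 (by omega) "create" rfl, Astep mn F 7 (by omega) "init" rfl,
    Astep mn F 8 (by omega) "validate" rfl, Astep mn F 9 (by omega) "edit" rfl]

lemma Bside (mn : String) (F : List String) :
    select_main_functions_alt F mn =
      (if catF mn F 10 = [] ∧ F ≠ [] then F.take 3 else catF mn F 10) := by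
  simp only [select_main_functions_alt]
  obtain ⟨hlen, hget⟩ := B_loop_inv mn F F []
    (List.replicate 10 []) (PySem.Set.ofList (F.filter (fun f => pvNorm f == pvNorm mn)))
    (fun x hx => hx) (by simp)
    (fun i hi => by
      rw [List.getD_eq_getElem _ [] (by simpa using hi), List.getElem_replicate]
      rfl)
    (fun x => by
      rw [PySem.Set.contains_iff, PySem.Set.mem_ofList, List.mem_filter]
      constructor
      · rintro ⟨hF, hp⟩
        exact Or.inl ⟨hp, hF⟩
      · rintro (⟨hp, hF⟩ | ⟨_, _, hnil⟩)
        · exact ⟨hF, hp⟩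
        · exact absurd hnil (by simp))
  have hbk : (pvBLoop F (List.replicate 10 [], PySem.Set.ofList (F.filter (fun f => pvNorm f == pvNorm mn)))).1
      = (List.range 10).map (fun i => growQ mn i F []) := by
    apply List.ext_getElem (by rw [hlen, List.length_map, List.length_range])
    intro i h1 h2
    have hi : i < 10 := hlen ▸ h1
    rw [List.getElem_map, List.getElem_range]
    rw [← List.getD_eq_getElem _ [] h1, hget i hi]
    simp
  rw [hbk]
  rw [show F.filter (fun f => pvNorm f == pvNorm mn) ++ ((List.range 10).map fun i => growQ mn i F []).flatten = catF mn F 10 from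
    by simp [catF, pvMod, List.flatMap_def]]

-- ===== VERDICT (by name: the statement is the Claim_ definition above) =====
theorem select_main_functions_spec : Claim_equal_select_main_functions := by
  intro F mn _
  unfold Spec_select_main_functions
  rw [Aside, Bside]
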